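-- pv_equiv track=rewrite | github.com/juswaldy/scrap | 01-anon/anon.py | _apply_numeric_pattern
-- ===== SOURCE A (Python) =====
-- def _apply_numeric_pattern(pattern: str, digits: str) -> str:
--     """Fill a numeric pattern (with non-digit separators) using the provided digits."""
--     result_chars = []
--     digit_index = 0
--     for ch in pattern:
--         if ch.isdigit():
--             result_chars.append(digits[digit_index])
--             digit_index += 1
--         else:
--             result_chars.append(ch)
--     return ''.join(result_chars)
-- ===== SOURCE B (Python) =====
-- def _apply_numeric_pattern(pattern: str, digits: str) -> str:
--     """Fill a numeric pattern (with non-digit separators) using the provided digits."""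
--     # Split the pattern on its digit slots into the runs of separator characters,
--     # then reassemble the string by interleaving those runs with the digits.
--     segments = []
--     current = []
--     for ch in pattern:
--         if ch.isdigit():
--             segments.append(''.join(current))
--             current = []
--         else:
--             current.append(ch)
--     segments.append(''.join(current))
--     parts = [segments[0]]
--     for i in range(len(segments) - 1):
--         parts.append(digits[i])
--         parts.append(segments[i + 1])
--     return ''.join(parts)
-- ===== Notes on version B (the rewrite author's own statement) =====
-- stated objective: alternative
-- what changed: B splits the pattern into the runs of non-digit separator characters between digit slots and then reassembles the output by interleaving those segments with the digits, instead of A's single char-by-char pass that substitutes digits in place with a running counter.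
import Mathlib
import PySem

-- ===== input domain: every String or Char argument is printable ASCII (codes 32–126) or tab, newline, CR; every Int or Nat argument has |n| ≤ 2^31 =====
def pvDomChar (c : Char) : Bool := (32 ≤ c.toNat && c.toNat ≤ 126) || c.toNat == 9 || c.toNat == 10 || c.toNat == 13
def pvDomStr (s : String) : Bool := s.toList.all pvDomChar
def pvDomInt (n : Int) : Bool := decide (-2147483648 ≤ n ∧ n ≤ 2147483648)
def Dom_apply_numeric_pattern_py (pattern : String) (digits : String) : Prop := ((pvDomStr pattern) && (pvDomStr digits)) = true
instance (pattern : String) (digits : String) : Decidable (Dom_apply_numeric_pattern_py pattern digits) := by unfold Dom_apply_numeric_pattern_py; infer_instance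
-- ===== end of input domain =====

-- B splits the pattern into the runs of non-digit separators between digit slots and then
-- interleaves those segments with the digits, instead of A's char-by-char substitution pass;
-- objective: alternative algorithm, same cost.

-- ===== PORT A =====
-- one pass over the pattern, appending either digits[digit_index] or the separator char;
-- digits[digit_index] is pyGet? (none = IndexError, excluded by Pre_; the getD default is never used there)
def apply_numeric_pattern_py (pattern : String) (digits : String) : String :=
  let st := pattern.toList.foldl
    (fun (st : List Char × Int) ch =>
      if PySem.Chars.isdigit ch then
        (st.1 ++ [(PySem.List.pyGet? digits.toList st.2).getD ch], st.2 + 1)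
      else
        (st.1 ++ [ch], st.2))
    ([], 0)
  String.mk st.1

-- ===== PORT B =====
-- first loop: split the pattern on digit slots into separator runs (segments, current);
-- second loop: parts = [segments[0]]; for i in range(len(segments)-1): parts += [digits[i], segments[i+1]];
-- return ''.join(parts).  digits[i] is pyGet? (none = IndexError, excluded by Pre_; the
-- getD default is never used there); segments[i+1] is always in range, default never used.
def apply_numeric_pattern_py_alt (pattern : String) (digits : String) : String :=
  let st := pattern.toList.foldl
    (fun (st : List (List Char) × List Char) ch =>
      if PySem.Chars.isdigit ch then (st.1 ++ [st.2], [])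
      else (st.1, st.2 ++ [ch]))
    ([], [])
  let segments := st.1 ++ [st.2]
  let parts := (PySem.List.pyRange 0 ((segments.length : Int) - 1) 1).foldl
    (fun parts i =>
      parts ++ [[(PySem.List.pyGet? digits.toList i).getD '?']]
            ++ [(PySem.List.pyGet? segments (i + 1)).getD []])
    [(PySem.List.pyGet? segments 0).getD []]
  String.mk parts.flatten

-- ===== PRECONDITION & SPEC =====
-- Pre_ excludes exactly the inputs with more digit positions in the pattern than provided digits,
-- on which Python A (and B) raise IndexError.
def Pre_apply_numeric_pattern_py (pattern : String) (digits : String) : Prop :=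
  pattern.toList.countP (fun c => PySem.Chars.isdigit c) ≤ digits.toList.length
instance (pattern : String) (digits : String) : Decidable (Pre_apply_numeric_pattern_py pattern digits) := by
  unfold Pre_apply_numeric_pattern_py; infer_instance

def pvWitness_apply_numeric_pattern_py : String × String := ("12-34", "9876")

def Spec_apply_numeric_pattern_py (pattern : String) (digits : String) (out : String) : Prop := out = apply_numeric_pattern_py_alt pattern digits
instance (pattern : String) (digits : String) (out : String) : Decidable (Spec_apply_numeric_pattern_py pattern digits out) := by unfold Spec_apply_numeric_pattern_py; infer_instance

-- ===== CLAIM (what is proved, stated in full; the proofs are below) =====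
def Claim_equal_apply_numeric_pattern_py : Prop := ∀ (pattern : String) (digits : String), Dom_apply_numeric_pattern_py pattern digits → Pre_apply_numeric_pattern_py pattern digits → Spec_apply_numeric_pattern_py pattern digits (apply_numeric_pattern_py pattern digits)

-- ===== LEMMAS AND PROOFS =====\n
def pvFill (ds : List Char) : List Char → List Char
  | [] => []
  | c :: cs =>
    if PySem.Chars.isdigit c then ds[0]?.getD '?' :: pvFill ds.tail cs
    else c :: pvFill ds cs

theorem pvA_foldl (ds : List Char) :
    ∀ (cs acc : List Char) (k : Nat), k + cs.countP (fun c => PySem.Chars.isdigit c) ≤ ds.length →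
    cs.foldl
      (fun (st : List Char × Int) ch =>
        if PySem.Chars.isdigit ch then
          (st.1 ++ [(PySem.List.pyGet? ds st.2).getD ch], st.2 + 1)
        else (st.1 ++ [ch], st.2))
      (acc, (k : Int))
    = (acc ++ pvFill (ds.drop k) cs, ((k + cs.countP (fun c => PySem.Chars.isdigit c) : Nat) : Int)) := by
  intro cs
  induction cs with
  | nil => intro acc k h; simp [pvFill]
  | cons c cs ih =>
    intro acc k h
    rw [List.foldl_cons]
    by_cases hc : PySem.Chars.isdigit c
    · have hcnt : (c :: cs).countP (fun c => PySem.Chars.isdigit c)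
          = cs.countP (fun c => PySem.Chars.isdigit c) + 1 := by simp [hc]
      have hk : k < ds.length := by rw [hcnt] at h; omega
      have hget : PySem.List.pyGet? ds ((k : Nat) : Int) = some ds[k] := by simp [hk]
      rw [if_pos hc, hget]
      have h1 : ((k : Int) + 1) = ((k + 1 : Nat) : Int) := by push_cast; ring
      rw [Option.getD_some, h1, ih (acc ++ [ds[k]]) (k + 1) (by rw [hcnt] at h; omega)]
      simp [pvFill, hc, hcnt, List.tail_drop, hk]
      omega
    · have hcnt : (c :: cs).countP (fun c => PySem.Chars.isdigit c)
          = cs.countP (fun c => PySem.Chars.isdigit c) := by simp [hc]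
      rw [if_neg hc, ih (acc ++ [c]) k (by rw [hcnt] at h; omega)]
      simp [pvFill, hc, hcnt]


def pvSegs : List Char → List (List Char)
  | [] => [[]]
  | c :: cs =>
    if PySem.Chars.isdigit c then [] :: pvSegs cs
    else match pvSegs cs with
      | [] => [[c]]
      | s :: ss => (c :: s) :: ss

theorem pvSegs_ne_nil (cs : List Char) : pvSegs cs ≠ [] := by
  cases cs with
  | nil => simp [pvSegs]
  | cons c cs =>
    by_cases h : PySem.Chars.isdigit c <;> simp only [pvSegs, h, if_true]
    · simp
    · cases pvSegs cs <;> simp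

def pvConsHead (cur : List Char) : List (List Char) → List (List Char)
  | [] => [cur]
  | s :: ss => (cur ++ s) :: ss

theorem pvB_split (cs : List Char) : ∀ (acc : List (List Char)) (cur : List Char),
    (cs.foldl
      (fun (st : List (List Char) × List Char) ch =>
        if PySem.Chars.isdigit ch then (st.1 ++ [st.2], [])
        else (st.1, st.2 ++ [ch]))
      (acc, cur)).1
    ++ [(cs.foldl
      (fun (st : List (List Char) × List Char) ch =>
        if PySem.Chars.isdigit ch then (st.1 ++ [st.2], [])
        else (st.1, st.2 ++ [ch]))
      (acc, cur)).2]
    = acc ++ pvConsHead cur (pvSegs cs) := by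
  induction cs with
  | nil => intro acc cur; simp [pvSegs, pvConsHead]
  | cons c cs ih =>
    intro acc cur
    rw [List.foldl_cons]
    by_cases hc : PySem.Chars.isdigit c
    · simp only [hc, if_true]
      rw [ih (acc ++ [cur]) []]
      obtain ⟨s, ss, hss⟩ : ∃ s ss, pvSegs cs = s :: ss := by
        cases h : pvSegs cs with
        | nil => exact absurd h (pvSegs_ne_nil cs)
        | cons s ss => exact ⟨s, ss, rfl⟩
      simp [pvSegs, hc, hss, pvConsHead]
    · simp only [hc, if_false, Bool.false_eq_true]
      rw [ih acc (cur ++ [c])]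
      cases h : pvSegs cs with
      | nil => exact absurd h (pvSegs_ne_nil cs)
      | cons s ss => simp [pvSegs, hc, h, pvConsHead]

def pvItl (ds : List Char) : List (List Char) → List Char
  | [] => []
  | s :: ss => ds[0]?.getD '?' :: (s ++ pvItl ds.tail ss)

theorem pvFill_segs (cs : List Char) : ∀ (ds : List Char),
    pvFill ds cs = (pvSegs cs).headI ++ pvItl ds (pvSegs cs).tail := by
  induction cs with
  | nil => intro ds; simp [pvFill, pvSegs, pvItl]
  | cons c cs ih =>
    intro ds
    by_cases hc : PySem.Chars.isdigit c
    · obtain ⟨s, ss, hss⟩ : ∃ s ss, pvSegs cs = s :: ss := by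
        cases h : pvSegs cs with
        | nil => exact absurd h (pvSegs_ne_nil cs)
        | cons s ss => exact ⟨s, ss, rfl⟩
      rw [show pvFill ds (c :: cs) = ds[0]?.getD '?' :: pvFill ds.tail cs by simp [pvFill, hc]]
      rw [ih ds.tail, hss]
      simp [pvSegs, hc, hss, pvItl]
    · cases h : pvSegs cs with
      | nil => exact absurd h (pvSegs_ne_nil cs)
      | cons s ss =>
        rw [show pvFill ds (c :: cs) = c :: pvFill ds cs by simp [pvFill, hc]]
        rw [ih ds, h]
        simp [pvSegs, hc, h]

theorem pvItl_range (rest : List (List Char)) : ∀ (ds : List Char),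
    (List.range rest.length).flatMap
      (fun k => ds[k]?.getD '?' :: (rest[k]?.getD [])) = pvItl ds rest := by
  induction rest with
  | nil => intro ds; simp [pvItl]
  | cons s ss ih =>
    intro ds
    rw [List.length_cons, List.range_succ_eq_map, List.flatMap_cons, List.flatMap_map]
    have : (fun k => ds[k+1]?.getD '?' :: ((s :: ss)[k+1]?.getD []))
        = (fun k => ds.tail[k]?.getD '?' :: (ss[k]?.getD [])) := by
      funext k; simp [List.getElem?_tail]
    rw [show (fun k => ds[k + 1]?.getD '?' :: ((s :: ss)[k + 1]?.getD [])) = _ from this]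
    rw [ih ds.tail]
    simp [pvItl]

-- flatten distributes over flatMap (used to flatten B's parts list)
theorem pvFlatten_flatMap (f : Int → List (List Char)) (r : List Int) :
    (r.flatMap f).flatten = r.flatMap (fun x => (f x).flatten) := by
  induction r with
  | nil => simp
  | cons a r ih => simp [ih]

-- ===== VERDICT (by name: the statement is the Claim_ definition above) =====
theorem apply_numeric_pattern_py_spec : Claim_equal_apply_numeric_pattern_py := by
  intro pattern digits _hdom hpre
  unfold Spec_apply_numeric_pattern_py
  set cs := pattern.toList with hcs
  set ds := digits.toList with hds
  -- A's port computes pvFill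
  have hA : apply_numeric_pattern_py pattern digits = String.mk (pvFill ds cs) := by
    have h := pvA_foldl ds cs [] 0 (by simpa [Pre_apply_numeric_pattern_py] using hpre)
    simp only [Int.natCast_zero, List.drop_zero, List.nil_append] at h
    show String.mk (cs.foldl _ ([], (0 : Int))).1 = _
    rw [h]
  -- B's port computes s0 ++ pvItl ds rest where pvSegs cs = s0 :: rest
  obtain ⟨s0, rest, hsegs⟩ : ∃ s0 rest, pvSegs cs = s0 :: rest := by
    cases h : pvSegs cs with
    | nil => exact absurd h (pvSegs_ne_nil cs)
    | cons s ss => exact ⟨s, ss, rfl⟩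
  have hB : apply_numeric_pattern_py_alt pattern digits = String.mk (s0 ++ pvItl ds rest) := by
    have hsplit := pvB_split cs [] []
    rw [hsegs] at hsplit
    simp only [pvConsHead, List.nil_append] at hsplit
    simp only [apply_numeric_pattern_py_alt, ← hcs, ← hds]
    rw [hsplit]
    have hlen : (((s0 :: rest).length : Int) - 1) = ((rest.length : Nat) : Int) := by
      simp
    rw [hlen]
    -- fold body as acc ++ chunk, then flatMap
    have hbody : (fun (parts : List (List Char)) (i : Int) =>
        parts ++ [[(PySem.List.pyGet? ds i).getD '?']]
              ++ [(PySem.List.pyGet? (s0 :: rest) (i + 1)).getD []])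
        = (fun parts i => parts ++
            ([[(PySem.List.pyGet? ds i).getD '?']]
              ++ [(PySem.List.pyGet? (s0 :: rest) (i + 1)).getD []])) := by
      funext parts i; simp
    rw [hbody, PySem.List.foldl_append_eq_flatMap]
    have hget0 : (PySem.List.pyGet? (s0 :: rest) 0).getD [] = s0 := by simp
    rw [hget0]
    rw [List.flatten_append, pvFlatten_flatMap]
    simp only [List.flatten_cons, List.flatten_nil, List.append_nil]
    congr 1
    rw [PySem.List.pyRange_one]
    simp only [sub_zero, Int.toNat_natCast, List.flatMap_map]
    rw [← pvItl_range rest ds]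
    congr 1
    apply List.flatMap_congr
    intro k _
    simp [PySem.List.pyGet?_natCast]
  rw [hA, hB, pvFill_segs cs ds, hsegs]
  simp
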